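-- pv_equiv track=rewrite | github.com/NavagonStarlightManav/Artificial-Intelligence-Lab | Blockworld_Puzzle.py | bfs
-- ===== SOURCE A (Python) =====
-- from collections import deque
--
-- def state_to_key(state):
--     # convert state (tuple of tuples) to an immutable key (already immutable) - returned directly
--     return state
--
-- def neighbors(state):
--     # yield (new_state, description) for every legal move: top of stack i -> stack j (i != j)
--     n = len(state)
--     for i in range(n):
--         if len(state[i]) == 0:
--             continue
--         for j in range(n):
--             if i == j:
--                 continue
--             # move top from i to j
--             src = list(state[i])
--             dest = list(state[j])
--             block = src.pop()           # top block
--             dest.append(block)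
--             new_state = list(state)
--             new_state[i] = tuple(src)
--             new_state[j] = tuple(dest)
--             move_desc = f"move {block} from stack {i} -> stack {j}"
--             yield tuple(new_state), move_desc
--
-- def bfs(start, goal):
--     q = deque()
--     q.append(start)
--     parent = { state_to_key(start): (None, None) }  # key -> (prev_state, move_description)
--     while q:
--         cur = q.popleft()
--         if cur == goal:
--             # reconstruct path
--             path = []
--             s = cur
--             while True:
--                 prev, mv = parent[state_to_key(s)]
--                 path.append((s, mv))
--                 if prev is None:
--                     break
--                 s = prev
--             path.reverse()
--             return path
--         for nxt, mv in neighbors(cur):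
--             k = state_to_key(nxt)
--             if k not in parent:
--                 parent[k] = (cur, mv)
--                 q.append(nxt)
--     return None
-- ===== SOURCE B (Python) =====
-- def state_to_key(state):
--     return state
--
-- def neighbors(state):
--     n = len(state)
--     for i in range(n):
--         if len(state[i]) == 0:
--             continue
--         for j in range(n):
--             if i == j:
--                 continue
--             src = list(state[i])
--             dest = list(state[j])
--             block = src.pop()
--             dest.append(block)
--             new_state = list(state)
--             new_state[i] = tuple(src)
--             new_state[j] = tuple(dest)
--             move_desc = f"move {block} from stack {i} -> stack {j}"
--             yield tuple(new_state), move_desc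
--
-- def bfs(start, goal):
--     # Level-synchronous BFS: no deque, the frontier is processed level by level;
--     # the path is rebuilt by forward recursion over the parent entries.
--     parent = {state_to_key(start): (None, None)}
--
--     def build(s):
--         prev, mv = parent[state_to_key(s)]
--         return ([] if prev is None else build(prev)) + [(s, mv)]
--
--     frontier = [start]
--     while frontier:
--         nxt = []
--         for cur in frontier:
--             if cur == goal:
--                 return build(cur)
--             for ns, mv in neighbors(cur):
--                 k = state_to_key(ns)
--                 if k not in parent:
--                     parent[k] = (cur, mv)
--                     nxt.append(ns)
--         frontier = nxt
--     return None
-- ===== Notes on version B (the rewrite author's own statement) =====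
-- stated objective: alternative
-- what changed: B replaces A's deque-driven BFS with a level-synchronous BFS (the frontier is a plain list processed level by level into the next-level list) and replaces A's backward parent-chain walk plus reverse by a forward recursive path rebuild.
import Mathlib
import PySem

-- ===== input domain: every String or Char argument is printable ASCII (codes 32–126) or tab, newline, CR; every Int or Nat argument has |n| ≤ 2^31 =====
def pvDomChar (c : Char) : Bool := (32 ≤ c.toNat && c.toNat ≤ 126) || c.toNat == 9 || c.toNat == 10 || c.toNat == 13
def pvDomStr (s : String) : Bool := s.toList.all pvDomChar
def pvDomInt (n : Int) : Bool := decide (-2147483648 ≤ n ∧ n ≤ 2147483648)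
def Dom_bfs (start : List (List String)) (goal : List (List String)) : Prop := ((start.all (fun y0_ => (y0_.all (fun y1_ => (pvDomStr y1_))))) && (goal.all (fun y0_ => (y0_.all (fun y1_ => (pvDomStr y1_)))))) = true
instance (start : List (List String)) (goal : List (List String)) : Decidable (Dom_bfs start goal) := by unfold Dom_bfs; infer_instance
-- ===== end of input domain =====

-- B replaces A's deque BFS + backward parent-chain reconstruction by a level-synchronous
-- BFS over plain frontier lists with a recursive forward path rebuild (alternative
-- decomposition, identical results).  Python's dict is Std.HashMap (exact: only O(1) get/contains/insert are used, it is never iterated); Python's deque (A only)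
-- is a two-list functional queue; every `fuel` below is a termination guard only, chosen
-- larger than the number of BFS dequeues (resp. parent-chain length), never reached.

-- neighbors(state): the module-level helper both A and B use verbatim,
-- yielding (new_state, move_desc) in i-then-j order
def neighbors (state : List (List String)) : List (List (List String) × String) :=
  let n := state.length
  (List.range n).foldl (fun acc i =>
    let si := state.getD i []
    if si.length = 0 then acc
    else (List.range n).foldl (fun acc2 j =>
      if i = j then acc2
      else
        let block := (si.getLast?).getD ""      -- src.pop() on a nonempty stack
        let src := si.dropLast
        let dest := (state.getD j []) ++ [block]
        let ns := (state.set i src).set j dest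
        let mv := "move " ++ block ++ " from stack " ++ PySem.Int.toStr (Int.ofNat i)
                   ++ " -> stack " ++ PySem.Int.toStr (Int.ofNat j)
        acc2 ++ [(ns, mv)]) acc) []

-- generous upper bound on the number of BFS dequeues (≥ number of reachable states), a pure guard
def pvFuel (start : List (List String)) : Nat :=
  let n := start.length
  let m := (start.map List.length).sum
  (n + m + 2) ^ (2 * m + n + 2) + 1

-- ===== PORT A =====

-- functional deque: popleft (Python: collections.deque)
def pvDeq {α : Type} (q : List α × List α) : Option (α × (List α × List α)) :=
  match q.1 with
  | x :: f => some (x, (f, q.2))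
  | [] =>
    match q.2.reverse with
    | x :: f => some (x, (f, []))
    | [] => none

-- A's inner `while True`: walk parent pointers backwards accumulating, then reverse
def reconA (parent : Std.HashMap (List (List String)) (Option (List (List String)) × Option String)) :
    Nat → List (List String) → List (List (List String) × Option String) →
    Option (List (List (List String) × Option String))
  | 0, _, _ => none
  | fuel + 1, s, path =>
    match parent.get? s with
    | none => none                              -- KeyError (never happens on a reachable key)
    | some (prev, mv) =>
      let path' := path ++ [(s, mv)]
      match prev with
      | none => some path'.reverse
      | some p => reconA parent fuel p path'

-- A's main `while q` loop over the deque
def loopA (goal : List (List String)) :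
    Nat → List (List (List String)) × List (List (List String)) →
    Std.HashMap (List (List String)) (Option (List (List String)) × Option String) →
    Option (List (List (List String) × Option String))
  | 0, _, _ => none
  | fuel + 1, q, parent =>
    match pvDeq q with
    | none => none
    | some (cur, q') =>
      if cur = goal then reconA parent (parent.size + 1) cur []
      else
        let st := (neighbors cur).foldl
          (fun (st : (List (List (List String)) × List (List (List String))) ×
                 Std.HashMap (List (List String)) (Option (List (List String)) × Option String)) nm =>
            if st.2.contains nm.1 then st
            else ((st.1.1, nm.1 :: st.1.2), st.2.insert nm.1 (some cur, some nm.2))) (q', parent)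
        loopA goal fuel st.1 st.2

def bfs (start : List (List String)) (goal : List (List String)) :
    Option (List (List (List String) × Option String)) :=
  loopA goal (pvFuel start) ([start], [])
    ((∅ : Std.HashMap (List (List String)) (Option (List (List String)) × Option String)).insert
      start ((none : Option (List (List String))), (none : Option String)))

-- ===== PORT B =====

-- B's `build(s)`: forward recursion over the parent entries
def reconB (parent : Std.HashMap (List (List String)) (Option (List (List String)) × Option String)) :
    Nat → List (List String) → Option (List (List (List String) × Option String))
  | 0, _ => none
  | fuel + 1, s =>
    match parent.get? s with
    | none => none
    | some (prev, mv) =>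
      match prev with
      | none => some [(s, mv)]
      | some p => (reconB parent fuel p).map (· ++ [(s, mv)])

-- B's `for cur in frontier` loop: early return (.inl) or the accumulated next level (.inr)
def levelB (goal : List (List String)) :
    Nat → List (List (List String)) → List (List (List String)) →
    Std.HashMap (List (List String)) (Option (List (List String)) × Option String) →
    (Option (List (List (List String) × Option String))) ⊕
      (Nat × List (List (List String)) ×
        Std.HashMap (List (List String)) (Option (List (List String)) × Option String))
  | fuel, [], nxt, parent => Sum.inr (fuel, nxt, parent)
  | 0, _ :: _, _, _ => Sum.inl none             -- fuel guard only
  | fuel + 1, cur :: rest, nxt, parent =>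
    if cur = goal then Sum.inl (reconB parent (parent.size + 1) cur)
    else
      let st := (neighbors cur).foldl
        (fun (st : List (List (List String)) ×
               Std.HashMap (List (List String)) (Option (List (List String)) × Option String)) nm =>
          if st.2.contains nm.1 then st
          else (st.1 ++ [nm.1], st.2.insert nm.1 (some cur, some nm.2))) (nxt, parent)
      levelB goal fuel rest st.1 st.2

theorem levelB_fuel_le (goal : List (List String)) :
    ∀ (l : List (List (List String))) (fuel : Nat) nxt parent fuel' a p',
    levelB goal fuel l nxt parent = Sum.inr (fuel', a, p') → fuel' ≤ fuel := by
  intro l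
  induction l with
  | nil => intro fuel nxt parent fuel' a p' h; simp [levelB] at h; omega
  | cons c r ih =>
    intro fuel nxt parent fuel' a p' h
    cases fuel with
    | zero => simp [levelB] at h
    | succ f =>
      simp only [levelB] at h
      split at h
      · simp at h
      · exact Nat.le_succ_of_le (ih f _ _ _ _ _ h)

theorem levelB_fuel_lt (goal : List (List String)) (fuel : Nat)
    (c : List (List String)) (rest nxt : List (List (List String)))
    (parent : Std.HashMap (List (List String)) (Option (List (List String)) × Option String))
    (fuel' : Nat) (a : List (List (List String)))
    (p' : Std.HashMap (List (List String)) (Option (List (List String)) × Option String))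
    (h : levelB goal fuel (c :: rest) nxt parent = Sum.inr (fuel', a, p')) : fuel' < fuel := by
  cases fuel with
  | zero => simp [levelB] at h
  | succ f =>
    simp only [levelB] at h
    split at h
    · simp at h
    · exact Nat.lt_succ_of_le (levelB_fuel_le goal rest f _ _ _ _ _ h)

-- B's outer `while frontier` loop
def outerB (goal : List (List String)) :
    Nat → List (List (List String)) →
    Std.HashMap (List (List String)) (Option (List (List String)) × Option String) →
    Option (List (List (List String) × Option String))
  | _, [], _ => none
  | fuel, c :: rest, parent =>
    match h : levelB goal fuel (c :: rest) [] parent with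
    | .inl r => r
    | .inr (fuel', nxt, parent') => outerB goal fuel' nxt parent'
  termination_by fuel l _ => fuel
  decreasing_by exact levelB_fuel_lt goal fuel c rest [] parent _ _ _ h

def bfs_alt (start : List (List String)) (goal : List (List String)) :
    Option (List (List (List String) × Option String)) :=
  outerB goal (pvFuel start) [start]
    ((∅ : Std.HashMap (List (List String)) (Option (List (List String)) × Option String)).insert
      start ((none : Option (List (List String))), (none : Option String)))

-- ===== PRECONDITION & SPEC =====
def Spec_bfs (start : List (List String)) (goal : List (List String)) (out : Option (List (List (List String) × Option String))) : Prop := out = bfs_alt start goal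
instance (start : List (List String)) (goal : List (List String)) (out : Option (List (List (List String) × Option String))) : Decidable (Spec_bfs start goal out) := by unfold Spec_bfs; infer_instance

-- ===== CLAIM (what is proved, stated in full; the proofs are below) =====
def Claim_equal_bfs : Prop := ∀ (start : List (List String)) (goal : List (List String)), Dom_bfs start goal → Spec_bfs start goal (bfs start goal)

-- ===== LEMMAS AND PROOFS =====

-- the abstract content of a two-list queue, front to back
def pvQList {α : Type} (q : List α × List α) : List α := q.1 ++ q.2.reverse

theorem pvDeq_nil {α : Type} (q : List α × List α) (h : pvQList q = []) : pvDeq q = none := by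
  obtain ⟨f, b⟩ := q
  simp only [pvQList, List.append_eq_nil_iff, List.reverse_eq_nil_iff] at h
  simp [pvDeq, h.1, h.2]

theorem pvDeq_cons {α : Type} (q : List α × List α) (x : α) (rest : List α)
    (h : pvQList q = x :: rest) :
    ∃ q', pvDeq q = some (x, q') ∧ pvQList q' = rest := by
  obtain ⟨f, b⟩ := q
  cases f with
  | cons y f' =>
    simp only [pvQList, List.cons_append, List.cons.injEq] at h
    obtain ⟨rfl, h2⟩ := h
    exact ⟨(f', b), rfl, h2⟩
  | nil =>
    simp only [pvQList, List.nil_append] at h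
    refine ⟨(rest, []), ?_, by simp [pvQList]⟩
    simp [pvDeq, h]

-- the two reconstructions agree: A's accumulator walk is B's recursion plus acc.reverse
theorem recon_eq (parent : Std.HashMap (List (List String)) (Option (List (List String)) × Option String)) :
    ∀ (fuel : Nat) (s : List (List String)) acc,
    reconA parent fuel s acc = (reconB parent fuel s).map (· ++ acc.reverse) := by
  intro fuel
  induction fuel with
  | zero => intro s acc; rfl
  | succ f ih =>
    intro s acc
    cases hs : parent.get? s with
    | none => simp only [reconA, reconB, hs]; rfl
    | some v =>
      obtain ⟨prev, mv⟩ := v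
      cases prev with
      | none => simp only [reconA, reconB, hs]; simp
      | some p =>
        simp only [reconA, reconB, hs]
        rw [ih p (acc ++ [(s, mv)])]
        cases reconB parent f p with
        | none => rfl
        | some q => simp

-- the two neighbor-folds produce the same new parent map and the same fresh children,
-- A appending them to the back of the deque, B to the end of the next-level list
theorem fold_eq (cur : List (List String)) :
    ∀ (ns : List (List (List String) × String)) parent
      (qf qb nxt : List (List (List String))),
    ∃ d p',
      ns.foldl
        (fun (st : (List (List (List String)) × List (List (List String))) ×
               Std.HashMap (List (List String)) (Option (List (List String)) × Option String)) nm =>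
          if st.2.contains nm.1 then st
          else ((st.1.1, nm.1 :: st.1.2), st.2.insert nm.1 (some cur, some nm.2))) ((qf, qb), parent)
        = ((qf, d.reverse ++ qb), p') ∧
      ns.foldl
        (fun (st : List (List (List String)) ×
               Std.HashMap (List (List String)) (Option (List (List String)) × Option String)) nm =>
          if st.2.contains nm.1 then st
          else (st.1 ++ [nm.1], st.2.insert nm.1 (some cur, some nm.2))) (nxt, parent)
        = (nxt ++ d, p') := by
  intro ns
  induction ns with
  | nil => intro parent qf qb nxt; exact ⟨[], parent, by simp, by simp⟩
  | cons nm ns ih =>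
    intro parent qf qb nxt
    simp only [List.foldl_cons]
    by_cases h : parent.contains nm.1
    · rw [if_pos h, if_pos h]
      exact ih parent qf qb nxt
    · rw [if_neg h, if_neg h]
      obtain ⟨d', p', hA, hB⟩ :=
        ih (parent.insert nm.1 (some cur, some nm.2)) qf (nm.1 :: qb) (nxt ++ [nm.1])
      refine ⟨nm.1 :: d', p', ?_, ?_⟩
      · rw [hA]; simp
      · rw [hB]; simp

-- the state of B mid-level: rest of the current level still to process, next level so far
def pvResume (goal : List (List String)) (fuel : Nat)
    (rest nxt : List (List (List String)))
    (parent : Std.HashMap (List (List String)) (Option (List (List String)) × Option String)) :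
    Option (List (List (List String) × Option String)) :=
  match levelB goal fuel rest nxt parent with
  | .inl r => r
  | .inr (fuel', a, p') => outerB goal fuel' a p'

theorem outerB_cons (goal : List (List String)) (fuel : Nat)
    (c : List (List String)) (rest : List (List (List String)))
    (parent : Std.HashMap (List (List String)) (Option (List (List String)) × Option String)) :
    outerB goal fuel (c :: rest) parent = pvResume goal fuel (c :: rest) [] parent := by
  rw [outerB]
  unfold pvResume
  cases h : levelB goal fuel (c :: rest) [] parent with
  | inl r => rfl
  | inr v => rfl

-- main simulation: A's deque always holds (rest of current level) ++ (next level so far)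
theorem main_eq (goal : List (List String)) :
    ∀ (fuel : Nat) (rest nxt : List (List (List String)))
      (parent : Std.HashMap (List (List String)) (Option (List (List String)) × Option String))
      (qA : List (List (List String)) × List (List (List String))),
    pvQList qA = rest ++ nxt →
    loopA goal fuel qA parent = pvResume goal fuel rest nxt parent := by
  intro fuel
  induction fuel using Nat.strong_induction_on with
  | _ fuel ih =>
    have hcons : ∀ (c : List (List String)) (r nxt : List (List (List String))) parent qA,
        pvQList qA = (c :: r) ++ nxt →
        loopA goal fuel qA parent = pvResume goal fuel (c :: r) nxt parent := by
      intro c r nxt parent qA hq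
      cases fuel with
      | zero => simp [loopA, pvResume, levelB]
      | succ f =>
        obtain ⟨q', hd, habs⟩ := pvDeq_cons qA c (r ++ nxt) hq
        simp only [loopA, pvResume, levelB, hd]
        by_cases hg : c = goal
        · rw [if_pos hg, if_pos hg]
          rw [recon_eq parent _ c []]
          cases reconB parent (parent.size + 1) c with
          | none => rfl
          | some p => simp
        · rw [if_neg hg, if_neg hg]
          obtain ⟨d, p', hA, hB⟩ := fold_eq c (neighbors c) parent q'.1 q'.2 nxt
          have hq' : (q'.1, q'.2) = q' := rfl
          rw [hq'] at hA
          rw [hA, hB]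
          have habs' : pvQList (q'.1, d.reverse ++ q'.2) = r ++ (nxt ++ d) := by
            simp [pvQList]
            rw [← List.append_assoc, ← List.append_assoc]
            have : q'.1 ++ q'.2.reverse = r ++ nxt := habs
            rw [this, List.append_assoc]
          exact ih f (Nat.lt_succ_self f) r (nxt ++ d) p' _ habs'
    intro rest nxt parent qA hq
    cases rest with
    | cons c r => exact hcons c r nxt parent qA hq
    | nil =>
      have hres : pvResume goal fuel [] nxt parent = outerB goal fuel nxt parent := by
        simp [pvResume, levelB]
      rw [hres]
      cases nxt with
      | nil =>
        simp only [List.nil_append] at hq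
        cases fuel with
        | zero => rw [outerB]; rfl
        | succ f => simp only [loopA, pvDeq_nil qA hq]; rw [outerB]
      | cons c r =>
        rw [outerB_cons]
        exact hcons c r [] parent qA (by simpa using hq)

-- ===== VERDICT (by name: the statement is the Claim_ definition above) =====
theorem bfs_spec : Claim_equal_bfs := by
  intro start goal _
  show bfs start goal = bfs_alt start goal
  unfold bfs bfs_alt
  rw [main_eq goal (pvFuel start) [start] [] _ ([start], []) (by simp [pvQList]),
      outerB_cons]
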